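-- pv_equiv track=rewrite | github.com/tkmonson/dsa-library | problems/food_distribution.py | food_distribution
-- ===== SOURCE A (Python) =====
-- from collections import deque
--
-- def food_distribution(arr):
--     N, h = arr[0], arr[1:]
--     score = sum(abs(h[i] - h[i + 1]) for i in range(len(h) - 1))
--
--     local_maxes = deque()
--     for i in range(1, len(h) - 1):
--         if h[i - 1] < h[i] > h[i + 1]:
--             local_maxes.append(i)
--
--     while local_maxes and N > 0:
--         i = local_maxes.popleft()
--         while h[i - 1] < h[i] > h[i + 1] and N > 0:
--             score -= 2
--             h[i] -= 1
--             N -= 1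
--
--     while h[0] > h[1] and N > 0:
--         score -= 1
--         h[0] -= 1
--         N -= 1
--
--     while h[-1] > h[-2] and N > 0:
--         score -= 1
--         h[-1] -= 1
--         N -= 1
--
--     return score
-- ===== SOURCE B (Python) =====
-- def food_distribution(arr):
--     N, h = arr[0], arr[1:]
--     score = sum(abs(a - b) for a, b in zip(h, h[1:]))
--     for i in range(1, len(h) - 1):
--         if N <= 0:
--             break
--         m = max(h[i - 1], h[i + 1])
--         if h[i] > m:
--             d = min(N, h[i] - m)
--             score -= 2 * d
--             h[i] -= d
--             N -= d
--     if N > 0 and h[0] > h[1]: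
--         d = min(N, h[0] - h[1])
--         score -= d
--         h[0] -= d
--         N -= d
--     if N > 0 and h[-1] > h[-2]:
--         score -= min(N, h[-1] - h[-2])
--     return score
-- ===== Notes on version B (the rewrite author's own statement) =====
-- stated objective: faster
-- what changed: Each per-unit while-loop (peak lowering and the two edge lowerings, one food unit per iteration) is replaced by a single closed-form subtraction min(remaining N, height drop) per peak/edge, and the deque of precomputed local maxima disappears in favour of one scan that tests peakhood against the current heights.
-- outside the precondition, e.g. on food_distribution([0]): A raises IndexError, B returns 0; on food_distribution([1]): A raises IndexError, B raises IndexError; on food_distribution([5, 3]): A raises IndexError, B raises IndexError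
import Mathlib
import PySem

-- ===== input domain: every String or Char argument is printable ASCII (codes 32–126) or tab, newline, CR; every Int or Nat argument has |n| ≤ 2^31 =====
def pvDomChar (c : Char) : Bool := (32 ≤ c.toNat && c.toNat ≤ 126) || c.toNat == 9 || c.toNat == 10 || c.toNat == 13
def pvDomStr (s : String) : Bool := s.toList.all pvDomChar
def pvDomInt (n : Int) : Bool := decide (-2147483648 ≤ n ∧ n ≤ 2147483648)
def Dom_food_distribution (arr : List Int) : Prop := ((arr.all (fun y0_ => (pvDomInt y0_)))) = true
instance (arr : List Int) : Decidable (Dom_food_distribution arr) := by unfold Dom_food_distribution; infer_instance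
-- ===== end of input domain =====

-- B replaces A's per-unit decrement loops (O(len + N) steps) by one closed-form
-- min(N, drop) subtraction per peak/edge (O(len) steps); return values agree on all
-- inputs with at least 2 heights (A raises IndexError otherwise).

-- ===== PORT A =====
-- score = sum(abs(h[i] - h[i+1]) for i in range(len(h) - 1))
def pvSumAbsA (h : List Int) : Int :=
  (List.range (h.length - 1)).foldl (fun s i => s + |h.getD i 0 - h.getD (i + 1) 0|) 0

-- inner `while h[i-1] < h[i] > h[i+1] and N > 0` loop; neighbours are fixed values
def pvPeakLoop (left hi right s n : Int) : Int × Int × Int :=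
  if left < hi ∧ right < hi ∧ 0 < n then
    pvPeakLoop left (hi - 1) right (s - 2) (n - 1)
  else (hi, s, n)
termination_by n.toNat
decreasing_by omega

-- `while local_maxes and N > 0: i = popleft(); <inner loop>` (deque popped front-to-back)
def pvProcessPeaks : List Nat → List Int → Int → Int → List Int × Int × Int
  | [], h, s, n => (h, s, n)
  | i :: rest, h, s, n =>
    if 0 < n then
      let r := pvPeakLoop (h.getD (i - 1) 0) (h.getD i 0) (h.getD (i + 1) 0) s n
      pvProcessPeaks rest (h.set i r.1) r.2.1 r.2.2
    else (h, s, n)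

-- `while a > b and N > 0: score -= 1; a -= 1; N -= 1`
def pvEdgeLoop (a b s n : Int) : Int × Int × Int :=
  if b < a ∧ 0 < n then pvEdgeLoop (a - 1) b (s - 1) (n - 1) else (a, s, n)
termination_by n.toNat
decreasing_by omega

-- indices: all in range under Pre_, so List.getD is exact for Python's h[i], h[-1]=h[len-1], h[-2]=h[len-2]
def food_distribution (arr : List Int) : Int :=
  let N := arr.getD 0 0
  let h := arr.drop 1
  let score := pvSumAbsA h
  -- for i in range(1, len(h)-1): if h[i-1] < h[i] > h[i+1]: append i  (range' 1 (len-2) = Python range(1, len(h)-1))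
  let peaks := (List.range' 1 (h.length - 2)).filter
      (fun i => decide (h.getD (i - 1) 0 < h.getD i 0 ∧ h.getD (i + 1) 0 < h.getD i 0))
  let r := pvProcessPeaks peaks h score N
  let h1 := r.1
  let e := pvEdgeLoop (h1.getD 0 0) (h1.getD 1 0) r.2.1 r.2.2
  let h2 := h1.set 0 e.1
  let e2 := pvEdgeLoop (h2.getD (h2.length - 1) 0) (h2.getD (h2.length - 2) 0) e.2.1 e.2.2
  e2.2.1

-- ===== PORT B =====
-- score = sum(abs(a - b) for a, b in zip(h, h[1:]))
def pvSumAbsB (h : List Int) : Int :=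
  ((h.zip (h.drop 1)).map (fun p => |p.1 - p.2|)).sum

-- for i in range(1, len(h)-1): break on N <= 0; closed-form drop min(N, h[i] - m) per peak
def pvAltPeaks : List Nat → List Int → Int → Int → List Int × Int × Int
  | [], h, s, n => (h, s, n)
  | i :: rest, h, s, n =>
    if n ≤ 0 then (h, s, n)
    else
      let m := max (h.getD (i - 1) 0) (h.getD (i + 1) 0)
      if m < h.getD i 0 then
        let d := min n (h.getD i 0 - m)
        pvAltPeaks rest (h.set i (h.getD i 0 - d)) (s - 2 * d) (n - d)
      else pvAltPeaks rest h s n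

-- if N > 0 and h[0] > h[1]: d = min(N, h[0]-h[1]); score -= d; h[0] -= d; N -= d
def pvEdge1 (h : List Int) (s n : Int) : List Int × Int × Int :=
  if 0 < n ∧ h.getD 1 0 < h.getD 0 0 then
    (h.set 0 (h.getD 0 0 - min n (h.getD 0 0 - h.getD 1 0)),
     s - min n (h.getD 0 0 - h.getD 1 0), n - min n (h.getD 0 0 - h.getD 1 0))
  else (h, s, n)

-- if N > 0 and h[-1] > h[-2]: score -= min(N, h[-1]-h[-2])
def pvEdge2 (h : List Int) (s n : Int) : Int :=
  if 0 < n ∧ h.getD (h.length - 2) 0 < h.getD (h.length - 1) 0 then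
    s - min n (h.getD (h.length - 1) 0 - h.getD (h.length - 2) 0)
  else s

def food_distribution_alt (arr : List Int) : Int :=
  let N := arr.getD 0 0
  let h := arr.drop 1
  let score := pvSumAbsB h
  let r := pvAltPeaks (List.range' 1 (h.length - 2)) h score N
  let e := pvEdge1 r.1 r.2.1 r.2.2
  pvEdge2 e.1 e.2.1 e.2.2

-- ===== PRECONDITION & SPEC =====
-- A indexes h[0], h[1], h[-1], h[-2] with h = arr[1:]; it raises IndexError unless len(arr) >= 3.
def Pre_food_distribution (arr : List Int) : Prop := 3 ≤ arr.length
instance (arr : List Int) : Decidable (Pre_food_distribution arr) := by unfold Pre_food_distribution; infer_instance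

def pvWitness_food_distribution : List Int := [2, 1, 5, 1]

def Spec_food_distribution (arr : List Int) (out : Int) : Prop := out = food_distribution_alt arr
instance (arr : List Int) (out : Int) : Decidable (Spec_food_distribution arr out) := by unfold Spec_food_distribution; infer_instance

-- ===== CLAIM (what is proved, stated in full; the proofs are below) =====
def Claim_equal_food_distribution : Prop := ∀ (arr : List Int), Dom_food_distribution arr → Pre_food_distribution arr → Spec_food_distribution arr (food_distribution arr)


-- ===== LEMMAS AND PROOFS =====

theorem pvPeakLoop_closed (left hi right s n : Int) :
    pvPeakLoop left hi right s n =
      (hi - max 0 (min n (hi - max left right)),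
       s - 2 * max 0 (min n (hi - max left right)),
       n - max 0 (min n (hi - max left right))) := by
  fun_induction pvPeakLoop left hi right s n with
  | case1 hi s n hcond ih =>
      rw [ih]
      simp only [Prod.mk.injEq]
      refine ⟨by omega, by omega, by omega⟩
  | case2 hi s n hcond =>
      simp only [Prod.mk.injEq]
      refine ⟨by omega, by omega, by omega⟩

theorem pvEdgeLoop_closed (a b s n : Int) :
    pvEdgeLoop a b s n =
      (a - max 0 (min n (a - b)), s - max 0 (min n (a - b)), n - max 0 (min n (a - b))) := by
  fun_induction pvEdgeLoop a b s n with
  | case1 a s n hcond ih =>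
      rw [ih]
      simp only [Prod.mk.injEq]
      refine ⟨by omega, by omega, by omega⟩
  | case2 a s n hcond =>
      simp only [Prod.mk.injEq]
      refine ⟨by omega, by omega, by omega⟩

theorem pvSumAbs_eq (h : List Int) (c : Int) :
    (List.range (h.length - 1)).foldl (fun s i => s + |h.getD i 0 - h.getD (i + 1) 0|) c
      = c + ((h.zip (h.drop 1)).map (fun p => |p.1 - p.2|)).sum := by
  induction h generalizing c with
  | nil => simp
  | cons x t ih =>
    cases t with
    | nil => simp
    | cons y t2 =>
      have hr : List.range ((x :: y :: t2).length - 1)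
          = 0 :: (List.range ((y :: t2).length - 1)).map Nat.succ := by
        simp [List.range_succ_eq_map]
      rw [hr]
      simp only [List.foldl_cons, List.foldl_map]
      have := ih (c := c + |(x :: y :: t2).getD 0 0 - (x :: y :: t2).getD 1 0|)
      simp only [List.getD_cons_succ, List.getD_cons_zero] at this ⊢
      rw [this]
      simp [List.zip_cons_cons]
      ring

theorem pvProcessPeaks_nonpos (l : List Nat) (h : List Int) (s n : Int) (hn : n ≤ 0) :
    pvProcessPeaks l h s n = (h, s, n) := by
  cases l with
  | nil => rfl
  | cons i rest => simp [pvProcessPeaks]; omega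

theorem pvAltPeaks_nonpos (l : List Nat) (h : List Int) (s n : Int) (hn : n ≤ 0) :
    pvAltPeaks l h s n = (h, s, n) := by
  cases l with
  | nil => rfl
  | cons i rest => simp only [pvAltPeaks, if_pos hn]

theorem pvPeaks_agree (h0 : List Int) :
    ∀ (l : List Nat) (h : List Int) (s n : Int),
      l.Pairwise (· < ·) →
      (∀ j ∈ l, 1 ≤ j ∧ j + 1 < h.length) →
      h.length = h0.length →
      (∀ j ∈ l, h.getD j 0 = h0.getD j 0 ∧ h.getD (j + 1) 0 = h0.getD (j + 1) 0 ∧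
        (h.getD (j - 1) 0 = h0.getD (j - 1) 0 ∨
         (h0.getD j 0 < h0.getD (j - 1) 0 ∧ h0.getD j 0 ≤ h.getD (j - 1) 0))) →
      pvProcessPeaks (l.filter
          (fun i => decide (h0.getD (i - 1) 0 < h0.getD i 0 ∧ h0.getD (i + 1) 0 < h0.getD i 0))) h s n
        = pvAltPeaks l h s n := by
  intro l
  induction l with
  | nil => intro h s n _ _ _ _; rfl
  | cons i rest ih =>
    intro h s n hsort hbnd hlen hinv
    by_cases hn : n ≤ 0
    · rw [pvProcessPeaks_nonpos _ _ _ _ hn, pvAltPeaks_nonpos _ _ _ _ hn]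
    · rw [not_le] at hn
      obtain ⟨hlt, hrest⟩ := List.pairwise_cons.mp hsort
      obtain ⟨hj1, hj2⟩ := hbnd i (by simp)
      obtain ⟨hvi, hvi1, hdisj⟩ := hinv i (by simp)
      have hilen : i < h.length := by omega
      by_cases hc : h0.getD (i - 1) 0 < h0.getD i 0 ∧ h0.getD (i + 1) 0 < h0.getD i 0
      · -- i is an original strict peak: current neighbourhood is original, both sides drop d
        have hleft : h.getD (i - 1) 0 = h0.getD (i - 1) 0 := by
          rcases hdisj with h' | h'
          · exact h'
          · omega
        rw [List.filter_cons_of_pos (by simpa using hc)]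
        simp only [pvProcessPeaks, if_pos hn, pvPeakLoop_closed, pvAltPeaks,
          if_neg (by omega : ¬ n ≤ 0), hleft, hvi, hvi1,
          if_pos (by omega : max (h0.getD (i - 1) 0) (h0.getD (i + 1) 0) < h0.getD i 0)]
        have hdd : max 0 (min n (h0.getD i 0 - max (h0.getD (i - 1) 0) (h0.getD (i + 1) 0)))
            = min n (h0.getD i 0 - max (h0.getD (i - 1) 0) (h0.getD (i + 1) 0)) := by omega
        rw [hdd]
        set d := min n (h0.getD i 0 - max (h0.getD (i - 1) 0) (h0.getD (i + 1) 0)) with hdef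
        have hdle : d ≤ h0.getD i 0 - h0.getD (i + 1) 0 := by
          have := le_max_right (h0.getD (i - 1) 0) (h0.getD (i + 1) 0)
          omega
        apply ih _ _ _ hrest
        · intro j hj
          have := hbnd j (List.mem_cons_of_mem _ hj)
          simpa [List.length_set] using this
        · simpa [List.length_set] using hlen
        · intro j hj
          have hij : i < j := hlt j hj
          obtain ⟨hv1, hv2, hv3⟩ := hinv j (List.mem_cons_of_mem _ hj)
          refine ⟨?_, ?_, ?_⟩
          · rw [List.getD_eq_getElem?_getD, List.getElem?_set_ne (by omega),
              ← List.getD_eq_getElem?_getD]; exact hv1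
          · rw [List.getD_eq_getElem?_getD, List.getElem?_set_ne (by omega),
              ← List.getD_eq_getElem?_getD]; exact hv2
          · by_cases hji : j = i + 1
            · subst hji
              right
              have hset : (h.set i (h0.getD i 0 - d)).getD (i + 1 - 1) 0 = h0.getD i 0 - d := by
                simp [List.getD_eq_getElem?_getD, hilen]
              rw [hset]
              simp only [Nat.add_sub_cancel]
              exact ⟨hc.2, by omega⟩
            · rw [List.getD_eq_getElem?_getD, List.getElem?_set_ne (by omega),
                ← List.getD_eq_getElem?_getD]
              exact hv3
      · -- not an original peak: A never queued it, B's current test is false too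
        have hskip : ¬ max (h.getD (i - 1) 0) (h.getD (i + 1) 0) < h.getD i 0 := by
          rcases hdisj with h' | h'
          · rw [hvi, hvi1, h']; omega
          · rw [hvi, hvi1]
            have := le_max_left (h.getD (i - 1) 0) (h0.getD (i + 1) 0)
            omega
        rw [List.filter_cons_of_neg (by simpa using hc)]
        simp only [pvAltPeaks, if_neg (by omega : ¬ n ≤ 0), if_neg hskip]
        apply ih _ _ _ hrest
        · intro j hj; exact hbnd j (List.mem_cons_of_mem _ hj)
        · exact hlen
        · intro j hj; exact hinv j (List.mem_cons_of_mem _ hj)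

def pvAfterPeaksA (r : List Int × Int × Int) : Int :=
  (pvEdgeLoop
    ((r.1.set 0 (pvEdgeLoop (r.1.getD 0 0) (r.1.getD 1 0) r.2.1 r.2.2).1).getD
       ((r.1.set 0 (pvEdgeLoop (r.1.getD 0 0) (r.1.getD 1 0) r.2.1 r.2.2).1).length - 1) 0)
    ((r.1.set 0 (pvEdgeLoop (r.1.getD 0 0) (r.1.getD 1 0) r.2.1 r.2.2).1).getD
       ((r.1.set 0 (pvEdgeLoop (r.1.getD 0 0) (r.1.getD 1 0) r.2.1 r.2.2).1).length - 2) 0)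
    (pvEdgeLoop (r.1.getD 0 0) (r.1.getD 1 0) r.2.1 r.2.2).2.1
    (pvEdgeLoop (r.1.getD 0 0) (r.1.getD 1 0) r.2.1 r.2.2).2.2).2.1

def pvBodyA (h : List Int) (N : Int) : Int :=
  pvAfterPeaksA (pvProcessPeaks
    ((List.range' 1 (h.length - 2)).filter
      (fun i => decide (h.getD (i - 1) 0 < h.getD i 0 ∧ h.getD (i + 1) 0 < h.getD i 0)))
    h (pvSumAbsA h) N)

def pvAfterPeaksB (r : List Int × Int × Int) : Int :=
  pvEdge2 (pvEdge1 r.1 r.2.1 r.2.2).1 (pvEdge1 r.1 r.2.1 r.2.2).2.1 (pvEdge1 r.1 r.2.1 r.2.2).2.2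

def pvBodyB (h : List Int) (N : Int) : Int :=
  pvAfterPeaksB (pvAltPeaks (List.range' 1 (h.length - 2)) h (pvSumAbsB h) N)

theorem pvAltPeaks_length (l : List Nat) : ∀ (h : List Int) (s n : Int),
    (pvAltPeaks l h s n).1.length = h.length := by
  induction l with
  | nil => intro h s n; rfl
  | cons i rest ih =>
    intro h s n
    simp only [pvAltPeaks]
    split
    · rfl
    · split
      · rw [ih]; simp
      · exact ih h s n

theorem pvAfterPeaks_eq (r : List Int × Int × Int) (hlen : 2 ≤ r.1.length) :
    pvAfterPeaksA r = pvAfterPeaksB r := by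
  obtain ⟨h1, s1, n1⟩ := r
  simp only at hlen
  simp only [pvAfterPeaksA, pvAfterPeaksB, pvEdge1, pvEdge2]
  rw [pvEdgeLoop_closed (h1.getD 0 0) (h1.getD 1 0) s1 n1]
  simp only
  by_cases hcond : 0 < n1 ∧ h1.getD 1 0 < h1.getD 0 0
  · rw [if_pos hcond]
    rw [show max 0 (min n1 (h1.getD 0 0 - h1.getD 1 0))
        = min n1 (h1.getD 0 0 - h1.getD 1 0) from by omega]
    rw [pvEdgeLoop_closed]
    simp only
    split
    · omega
    · omega
  · rw [if_neg hcond]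
    rw [show max 0 (min n1 (h1.getD 0 0 - h1.getD 1 0)) = 0 from by omega]
    simp only [sub_zero]
    have hslen : (h1.set 0 (h1.getD 0 0)).length = h1.length := by simp
    have e1 : (h1.set 0 (h1.getD 0 0)).getD ((h1.set 0 (h1.getD 0 0)).length - 1) 0
        = h1.getD (h1.length - 1) 0 := by
      rw [hslen, List.getD_eq_getElem?_getD, List.getElem?_set_ne (by omega),
        ← List.getD_eq_getElem?_getD]
    have e2 : (h1.set 0 (h1.getD 0 0)).getD ((h1.set 0 (h1.getD 0 0)).length - 2) 0
        = h1.getD (h1.length - 2) 0 := by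
      rw [hslen]
      by_cases h2 : h1.length = 2
      · rw [h2]
        simp only [Nat.sub_self]
        simp [List.getD_eq_getElem?_getD, (by omega : 0 < h1.length)]
      · rw [List.getD_eq_getElem?_getD, List.getElem?_set_ne (by omega),
          ← List.getD_eq_getElem?_getD]
    rw [e1, e2, pvEdgeLoop_closed]
    simp only
    split
    · omega
    · omega

theorem pvBody_eq (h : List Int) (N : Int) (hlen : 2 ≤ h.length) :
    pvBodyA h N = pvBodyB h N := by
  unfold pvBodyA pvBodyB
  rw [show pvSumAbsA h = pvSumAbsB h from by
    simpa [pvSumAbsA, pvSumAbsB] using pvSumAbs_eq h 0]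
  rw [pvPeaks_agree h (List.range' 1 (h.length - 2)) h (pvSumAbsB h) N
    (List.pairwise_lt_range' ..)
    (fun j hj => by have := List.mem_range'_1.mp hj; omega)
    rfl
    (fun j hj => ⟨rfl, rfl, Or.inl rfl⟩)]
  exact pvAfterPeaks_eq _ (by rw [pvAltPeaks_length]; omega)

-- ===== VERDICT (by name: the statement is the Claim_ definition above) =====
theorem food_distribution_spec : Claim_equal_food_distribution := by
  intro arr _ hpre
  unfold Spec_food_distribution
  have hlen : 2 ≤ (arr.drop 1).length := by
    unfold Pre_food_distribution at hpre
    simp only [List.length_drop]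
    omega
  have hA : food_distribution arr = pvBodyA (arr.drop 1) (arr.getD 0 0) := rfl
  have hB : food_distribution_alt arr = pvBodyB (arr.drop 1) (arr.getD 0 0) := rfl
  rw [hA, hB]
  exact pvBody_eq (arr.drop 1) (arr.getD 0 0) hlen
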